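-- pv_equiv track=rewrite | github.com/scmbuildrelease/gitfusionsrc | libexec/repo_compare.py | diff_iter
-- ===== SOURCE A (Python) =====
-- from   difflib     import SequenceMatcher
--
-- def diff_iter(list_a, list_b):
--     """Pull the next element off of a, b, or both."""
--     matcher = SequenceMatcher( a        = list_a
--                              , b        = list_b
--                              , isjunk   = None
--                              , autojunk = False )
--     for opcode in matcher.get_opcodes():
--                         # get_opcode() yields unnamed tuples. Grr.
--                         # < o=tag, 1=i1, 2=i2, 3=j1, 4=j2 >
--         if opcode[0] in ['equal', 'delete']:
--             for aa in list_a[opcode[1]: opcode[2]]: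
--                 yield aa
--         elif opcode[0] == 'insert':
--             for bb in list_b[opcode[3]: opcode[4]]:
--                 yield bb
--         else:  # opcode[0] == 'replace'
--             for aa in list_a[opcode[1]: opcode[2]]:
--                 yield aa
--             for bb in list_b[opcode[3]: opcode[4]]:
--                 yield bb
-- ===== SOURCE B (Python) =====
-- def diff_iter(list_a, list_b):
--     """Pull the next element off of a, b, or both."""
--
--     def longest_match(alo, ahi, blo, bhi):
--         # Longest common run inside the window, found by direct search:
--         # at every matching cell measure the run of matches ending there,
--         # keeping the first longest run's start.
--         besti, bestj, bestsize = alo, blo, 0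
--         for i in range(alo, ahi):
--             for j in range(blo, bhi):
--                 if list_a[i] == list_b[j]:
--                     k = 1
--                     while i - k >= alo and j - k >= blo \
--                             and list_a[i - k] == list_b[j - k]:
--                         k += 1
--                     if k > bestsize:
--                         besti, bestj, bestsize = i - k + 1, j - k + 1, k
--         return besti, bestj, bestsize
--
--     def walk(alo, ahi, blo, bhi):
--         # Emit the window in order: everything left of the longest common
--         # run, the run itself, then everything right of it; a window with
--         # no common run flushes its a-side, then its b-side.
--         i, j, k = longest_match(alo, ahi, blo, bhi)
--         if k == 0:
--             yield from list_a[alo:ahi]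
--             yield from list_b[blo:bhi]
--         else:
--             yield from walk(alo, i, blo, j)
--             yield from list_a[i:i + k]
--             yield from walk(i + k, ahi, j + k, bhi)
--
--     yield from walk(0, len(list_a), 0, len(list_b))
-- ===== Notes on version B (the rewrite author's own statement) =====
-- stated objective: alternative
-- what changed: B is a self-contained recursive divide-and-conquer diff: a brute-force search for the longest common run (no b2j index, no j2len dict, no queue, no sort, no block merge, no opcodes) that recurses on the window left of the run, emits the run, then recurses on the right, streaming the merged sequence in order.
import Mathlib
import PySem

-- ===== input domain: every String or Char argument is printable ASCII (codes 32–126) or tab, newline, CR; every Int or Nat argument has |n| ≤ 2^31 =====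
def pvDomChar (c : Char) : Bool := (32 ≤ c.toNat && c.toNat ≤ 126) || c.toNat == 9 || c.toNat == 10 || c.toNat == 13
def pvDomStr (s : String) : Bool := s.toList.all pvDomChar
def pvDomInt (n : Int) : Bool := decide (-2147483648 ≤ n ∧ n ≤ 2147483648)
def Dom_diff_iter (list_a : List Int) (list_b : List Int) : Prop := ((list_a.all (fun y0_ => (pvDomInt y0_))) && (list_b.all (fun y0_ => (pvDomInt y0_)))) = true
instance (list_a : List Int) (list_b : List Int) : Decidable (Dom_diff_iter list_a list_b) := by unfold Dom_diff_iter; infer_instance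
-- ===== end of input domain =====

-- B replaces A's difflib/get_opcodes pipeline by a self-contained recursive
-- divide-and-conquer diff: a brute-force longest-common-run search (no b2j index,
-- no j2len dict, no queue, no sort, no block merge, no opcodes), recursing left of
-- the run, emitting the run, then recursing right (objective: alternative).

-- ===== PORT A =====
-- A calls difflib.SequenceMatcher(isjunk=None, autojunk=False).get_opcodes();
-- that library call is ported here as a faithful transliteration of CPython's
-- difflib for those settings (no junk, so the junk-only extension loops of
-- find_longest_match are no-ops and are omitted).

-- xs[lo:hi] for Nat bounds: exact for Python slices with non-negative bounds (Python clamps to len)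
def sliceN (xs : List Int) (lo hi : Nat) : List Int := (xs.drop lo).take (hi - lo)

-- b2j.get(x, []): the indices j (increasing) with b[j] == x (CPython builds this dict
-- by one pass over b appending each index; the per-key value is exactly this list)
def b2jGet (b : List Int) (x : Int) : List Nat :=
  (List.range b.length).filter (fun j => b.getD j 0 == x)

-- inner loop of find_longest_match: 'for j in b2j.get(a[i], []):' with continue/break;
-- j2len keyed by Int so that j2len.get(j-1, 0) at j = 0 reads key -1 (absent) as in Python
def flmInner (blo bhi i : Nat) (j2len : PySem.Dict Int Nat) :
    List Nat → PySem.Dict Int Nat → Nat × Nat × Nat → PySem.Dict Int Nat × (Nat × Nat × Nat)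
  | [], newj2len, best => (newj2len, best)
  | j :: js, newj2len, best =>
    if j < blo then flmInner blo bhi i j2len js newj2len best          -- continue
    else if bhi ≤ j then (newj2len, best)                              -- break
    else
      let k := j2len.getD ((j : Int) - 1) 0 + 1
      let newj2len := newj2len.insert (j : Int) k
      let best := if best.2.2 < k then (i + 1 - k, j + 1 - k, k) else best
      flmInner blo bhi i j2len js newj2len best

-- outer loop: 'for i in range(alo, ahi):'
def flmOuter (a b : List Int) (blo bhi : Nat) :
    List Nat → PySem.Dict Int Nat → Nat × Nat × Nat → Nat × Nat × Nat
  | [], _, best => best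
  | i :: is, j2len, best =>
    let r := flmInner blo bhi i j2len (b2jGet b (a.getD i 0)) (PySem.Dict.ofList []) best
    flmOuter a b blo bhi is r.1 r.2

-- 'while besti > alo and bestj > blo and a[besti-1] == b[bestj-1]: …'
def extendLeft (a b : List Int) (alo blo : Nat) (besti bestj bestsize : Nat) : Nat × Nat × Nat :=
  if alo < besti ∧ blo < bestj ∧ a.getD (besti - 1) 0 = b.getD (bestj - 1) 0 then
    extendLeft a b alo blo (besti - 1) (bestj - 1) (bestsize + 1)
  else (besti, bestj, bestsize)
termination_by besti
decreasing_by omega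

-- 'while besti+bestsize < ahi and bestj+bestsize < bhi and a[..] == b[..]: bestsize += 1'
def extendRight (a b : List Int) (ahi bhi : Nat) (besti bestj bestsize : Nat) : Nat :=
  if besti + bestsize < ahi ∧ bestj + bestsize < bhi ∧
     a.getD (besti + bestsize) 0 = b.getD (bestj + bestsize) 0 then
    extendRight a b ahi bhi besti bestj (bestsize + 1)
  else bestsize
termination_by ahi - (besti + bestsize)
decreasing_by omega

def findLongestMatch (a b : List Int) (alo ahi blo bhi : Nat) : Nat × Nat × Nat :=
  let best := flmOuter a b blo bhi (List.range' alo (ahi - alo)) (PySem.Dict.ofList []) (alo, blo, 0)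
  let l := extendLeft a b alo blo best.1 best.2.1 best.2.2
  let s := extendRight a b ahi bhi l.1 l.2.1 l.2.2
  (l.1, l.2.1, s)

-- the queue loop of get_matching_blocks; the stack head is Python's list end
-- (queue.pop() / append); fuel only makes the loop total — it never runs out, since
-- (sum of interval spans) + (queue length) starts at |a|+|b|+1 and drops each step
def gmbQueue (a b : List Int) : Nat → List (Nat × Nat × Nat × Nat) → List (Nat × Nat × Nat) → List (Nat × Nat × Nat)
  | 0, _, acc => acc
  | _ + 1, [], acc => acc
  | fuel + 1, (alo, ahi, blo, bhi) :: rest, acc =>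
    let x := findLongestMatch a b alo ahi blo bhi
    if x.2.2 ≠ 0 then
      let rest := if alo < x.1 ∧ blo < x.2.1 then (alo, x.1, blo, x.2.1) :: rest else rest
      let rest := if x.1 + x.2.2 < ahi ∧ x.2.1 + x.2.2 < bhi then
                    (x.1 + x.2.2, ahi, x.2.1 + x.2.2, bhi) :: rest else rest
      gmbQueue a b fuel rest (acc ++ [x])
    else gmbQueue a b fuel rest acc

-- Python tuple '<' on (Nat,Nat,Nat): lexicographic
def lexLt (x y : Nat × Nat × Nat) : Bool :=
  x.1 < y.1 ∨ (x.1 = y.1 ∧ (x.2.1 < y.2.1 ∨ (x.2.1 = y.2.1 ∧ x.2.2 < y.2.2)))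

-- 'matching_blocks.sort()': stable sort under tuple '<' (hand lexLt because Lean's
-- Prod order is not lexicographic and new instances are not allowed here)
def sortBlocks (xs : List (Nat × Nat × Nat)) : List (Nat × Nat × Nat) :=
  xs.mergeSort (fun x y => ! lexLt y x)

-- the adjacency-merging loop of get_matching_blocks
def mergeAdj : List (Nat × Nat × Nat) → Nat × Nat × Nat → List (Nat × Nat × Nat) → List (Nat × Nat × Nat)
  | [], (i1, j1, k1), acc => if k1 ≠ 0 then acc ++ [(i1, j1, k1)] else acc
  | (i2, j2, k2) :: rest, (i1, j1, k1), acc =>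
    if i1 + k1 = i2 ∧ j1 + k1 = j2 then mergeAdj rest (i1, j1, k1 + k2) acc
    else mergeAdj rest (i2, j2, k2) (if k1 ≠ 0 then acc ++ [(i1, j1, k1)] else acc)

def getMatchingBlocks (a b : List Int) : List (Nat × Nat × Nat) :=
  let blocks := sortBlocks (gmbQueue a b (a.length + b.length + 2)
                              [(0, a.length, 0, b.length)] [])
  mergeAdj blocks (0, 0, 0) [] ++ [(a.length, b.length, 0)]

-- get_opcodes(): tag dispatch over the matching blocks with cursors i, j
def opcodesLoop : List (Nat × Nat × Nat) → Nat → Nat → List (String × Nat × Nat × Nat × Nat)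
  | [], _, _ => []
  | (ai, bj, size) :: rest, i, j =>
    let tag : String := if i < ai ∧ j < bj then "replace"
                        else if i < ai then "delete"
                        else if j < bj then "insert" else ""
    (if tag ≠ "" then [(tag, i, ai, j, bj)] else []) ++
    (if size ≠ 0 then [("equal", ai, ai + size, bj, bj + size)] else []) ++
    opcodesLoop rest (ai + size) (bj + size)

-- the body of A's for-loop over get_opcodes()
def emitOne (a b : List Int) (op : String × Nat × Nat × Nat × Nat) : List Int :=
  if op.1 = "equal" ∨ op.1 = "delete" then sliceN a op.2.1 op.2.2.1
  else if op.1 = "insert" then sliceN b op.2.2.2.1 op.2.2.2.2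
  else sliceN a op.2.1 op.2.2.1 ++ sliceN b op.2.2.2.1 op.2.2.2.2

def diff_iter (list_a : List Int) (list_b : List Int) : List Int :=
  (opcodesLoop (getMatchingBlocks list_a list_b) 0 0).flatMap (emitOne list_a list_b)

-- ===== PORT B =====

-- B's inner while: 'k = 1; while i-k >= alo and j-k >= blo and list_a[i-k] == list_b[j-k]: k += 1'
def runBack (a b : List Int) (alo blo i j k : Nat) : Nat :=
  if h : alo + k ≤ i ∧ blo + k ≤ j ∧ a.getD (i - k) 0 = b.getD (j - k) 0 then
    runBack a b alo blo i j (k + 1)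
  else k
termination_by i + 1 - k
decreasing_by omega

-- B's longest_match: brute-force nested scan, measuring the run ending at every
-- matching cell and keeping the first longest run's start
def bestRun (a b : List Int) (alo ahi blo bhi : Nat) : Nat × Nat × Nat :=
  (List.range' alo (ahi - alo)).foldl (fun best i =>
    (List.range' blo (bhi - blo)).foldl (fun best j =>
      if a.getD i 0 = b.getD j 0 then
        let k := runBack a b alo blo i j 1
        if best.2.2 < k then (i + 1 - k, j + 1 - k, k) else best
      else best) best) (alo, blo, 0)

-- the two bounds lemmas below are cited by walkB's decreasing_by (termination only)
theorem runBack_le (a b : List Int) (alo blo i j : Nat) :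
    ∀ n k, i + 1 - k ≤ n → alo + k ≤ i + 1 → blo + k ≤ j + 1 →
      alo + runBack a b alo blo i j k ≤ i + 1 ∧ blo + runBack a b alo blo i j k ≤ j + 1 ∧
      k ≤ runBack a b alo blo i j k := by
  intro n
  induction n with
  | zero =>
    intro k hk h1 h2
    rw [runBack]
    split
    · rename_i hg; omega
    · omega
  | succ n ih =>
    intro k hk h1 h2
    rw [runBack]
    split
    · rename_i hg
      have h3 := ih (k + 1) (by omega) (by omega) (by omega)
      omega
    · exact ⟨h1, h2, le_refl _⟩

def goodRun (alo ahi blo bhi : Nat) (r : Nat × Nat × Nat) : Prop :=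
  r.2.2 ≠ 0 → 1 ≤ r.2.2 ∧ alo ≤ r.1 ∧ r.1 + r.2.2 ≤ ahi ∧ blo ≤ r.2.1 ∧ r.2.1 + r.2.2 ≤ bhi

theorem bestRun_good (a b : List Int) (alo ahi blo bhi : Nat) :
    goodRun alo ahi blo bhi (bestRun a b alo ahi blo bhi) := by
  unfold bestRun
  refine List.foldlRecOn _ _ (fun h0 => absurd rfl h0) ?_
  intro best hbest i hi
  have hi' : alo ≤ i ∧ i < ahi := by
    have := List.mem_range'_1.mp hi; omega
  refine List.foldlRecOn _ _ hbest ?_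
  intro best' hbest' j hj
  have hj' : blo ≤ j ∧ j < bhi := by
    have := List.mem_range'_1.mp hj; omega
  split
  · have hrb := runBack_le a b alo blo i j (i + 1) 1 (by omega) (by omega) (by omega)
    show goodRun alo ahi blo bhi (if best'.2.2 < runBack a b alo blo i j 1 then
      (i + 1 - runBack a b alo blo i j 1, j + 1 - runBack a b alo blo i j 1,
        runBack a b alo blo i j 1) else best')
    split
    · intro _
      try dsimp only
      refine ⟨by omega, by omega, by omega, by omega, by omega⟩
    · exact hbest'
  · exact hbest'

theorem bestRun_bounds (a b : List Int) (alo ahi blo bhi : Nat)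
    (h : (bestRun a b alo ahi blo bhi).2.2 ≠ 0) :
    1 ≤ (bestRun a b alo ahi blo bhi).2.2 ∧
    alo ≤ (bestRun a b alo ahi blo bhi).1 ∧
    (bestRun a b alo ahi blo bhi).1 + (bestRun a b alo ahi blo bhi).2.2 ≤ ahi ∧
    blo ≤ (bestRun a b alo ahi blo bhi).2.1 ∧
    (bestRun a b alo ahi blo bhi).2.1 + (bestRun a b alo ahi blo bhi).2.2 ≤ bhi :=
  bestRun_good a b alo ahi blo bhi h

-- B's walk: emit the window left of the longest run, the run, then the right window;
-- a window with no common run flushes its a-side then its b-side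
def walkB (a b : List Int) (alo ahi blo bhi : Nat) : List Int :=
  let r := bestRun a b alo ahi blo bhi
  if h : r.2.2 = 0 then sliceN a alo ahi ++ sliceN b blo bhi
  else
    walkB a b alo r.1 blo r.2.1 ++ sliceN a r.1 (r.1 + r.2.2) ++
      walkB a b (r.1 + r.2.2) ahi (r.2.1 + r.2.2) bhi
termination_by (ahi - alo) + (bhi - blo)
decreasing_by
  · have hb := bestRun_bounds a b alo ahi blo bhi h
    omega
  · have hb := bestRun_bounds a b alo ahi blo bhi h
    omega

def diff_iter_alt (list_a : List Int) (list_b : List Int) : List Int :=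
  walkB list_a list_b 0 list_a.length 0 list_b.length

-- ===== PRECONDITION & SPEC =====
def Spec_diff_iter (list_a : List Int) (list_b : List Int) (out : List Int) : Prop := out = diff_iter_alt list_a list_b
instance (list_a : List Int) (list_b : List Int) (out : List Int) : Decidable (Spec_diff_iter list_a list_b out) := by unfold Spec_diff_iter; infer_instance

-- ===== CLAIM (what is proved, stated in full; the proofs are below) =====
def Claim_equal_diff_iter : Prop := ∀ (list_a : List Int) (list_b : List Int), Dom_diff_iter list_a list_b → Spec_diff_iter list_a list_b (diff_iter list_a list_b)

-- ===== LEMMAS AND PROOFS =====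

-- ===== PART 1: findLongestMatch = bestRun =====
-- Both inner searches visit the matching cells (i, j) in the same order and score
-- each with the same value eVal (the length of the diagonal run of matches ending
-- at (i, j), clipped at the window's top-left): difflib's j2len dict carries it,
-- B's backward while loop recomputes it.  So both loops are the same fold.

-- length of the run of matches ending at (i, j), not reaching above row alo
-- nor left of column blo, with the column constrained below bhi
def eVal (a b : List Int) (alo blo bhi i j : Nat) : Nat :=
  if alo ≤ i ∧ blo ≤ j ∧ j < bhi ∧ a.getD i 0 = b.getD j 0 then
    (if h : 0 < i ∧ 0 < j then eVal a b alo blo bhi (i - 1) (j - 1) else 0) + 1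
  else 0
termination_by i
decreasing_by omega

-- the matching columns of row i inside the window, in scan order
def evs (a b : List Int) (blo bhi i : Nat) : List Nat :=
  (List.range' blo (bhi - blo)).filter (fun j => decide (a.getD i 0 = b.getD j 0))

def candE (a b : List Int) (alo blo bhi i j : Nat) : Nat × Nat × Nat :=
  (i + 1 - eVal a b alo blo bhi i j, j + 1 - eVal a b alo blo bhi i j, eVal a b alo blo bhi i j)

def allCands (a b : List Int) (alo ahi blo bhi : Nat) : List (Nat × Nat × Nat) :=
  (List.range' alo (ahi - alo)).flatMap
    (fun i => (evs a b blo bhi i).map (candE a b alo blo bhi i))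

def updB (best c : Nat × Nat × Nat) : Nat × Nat × Nat := if best.2.2 < c.2.2 then c else best

theorem eVal_pos (a b : List Int) (alo blo bhi i j : Nat)
    (h : alo ≤ i ∧ blo ≤ j ∧ j < bhi ∧ a.getD i 0 = b.getD j 0) :
    1 ≤ eVal a b alo blo bhi i j := by
  rw [eVal, if_pos h]; omega

theorem eVal_ne_zero_imp (a b : List Int) (alo blo bhi i j : Nat)
    (h : eVal a b alo blo bhi i j ≠ 0) :
    alo ≤ i ∧ blo ≤ j ∧ j < bhi ∧ a.getD i 0 = b.getD j 0 := by
  by_contra hg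
  rw [eVal, if_neg hg] at h
  exact h rfl

theorem eVal_le (a b : List Int) (alo blo bhi : Nat) :
    ∀ i j, 1 ≤ eVal a b alo blo bhi i j →
      alo + eVal a b alo blo bhi i j ≤ i + 1 ∧ blo + eVal a b alo blo bhi i j ≤ j + 1 := by
  intro i
  induction i using Nat.strong_induction_on with
  | _ i ih =>
    intro j h
    have hg := eVal_ne_zero_imp a b alo blo bhi i j (by omega)
    rw [eVal, if_pos hg]
    by_cases hij : 0 < i ∧ 0 < j
    · rw [dif_pos hij]
      rcases Nat.eq_zero_or_pos (eVal a b alo blo bhi (i - 1) (j - 1)) with h0 | h1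
      · rw [h0]; omega
      · have := ih (i - 1) (by omega) (j - 1) h1
        omega
    · rw [dif_neg hij]; omega

theorem eVal_noextend (a b : List Int) (alo blo bhi : Nat) :
    ∀ K i j, j < bhi → alo + K ≤ i → blo + K ≤ j →
      a.getD (i - K) 0 = b.getD (j - K) 0 → eVal a b alo blo bhi i j ≠ K := by
  intro K
  induction K with
  | zero =>
    intro i j hbhi h1 h2 hm
    have : a.getD i 0 = b.getD j 0 := by simpa using hm
    rw [eVal, if_pos ⟨by omega, by omega, hbhi, this⟩]
    omega
  | succ K ih =>
    intro i j hbhi h1 h2 hm hE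
    rw [eVal] at hE
    split at hE
    · rw [dif_pos (by omega : 0 < i ∧ 0 < j)] at hE
      have hE' : eVal a b alo blo bhi (i - 1) (j - 1) = K := by omega
      have hm' : a.getD (i - 1 - K) 0 = b.getD (j - 1 - K) 0 := by
        have e1 : i - 1 - K = i - (K + 1) := by omega
        have e2 : j - 1 - K = j - (K + 1) := by omega
        rw [e1, e2]; exact hm
      exact ih (i - 1) (j - 1) (by omega) (by omega) (by omega) hm' hE'
    · omega

theorem eVal_succ (a b : List Int) (alo blo bhi i j : Nat)
    (h1 : alo ≤ i + 1) (h2 : blo ≤ j + 1) (h3 : j + 1 < bhi)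
    (hm : a.getD (i + 1) 0 = b.getD (j + 1) 0) :
    eVal a b alo blo bhi (i + 1) (j + 1) = eVal a b alo blo bhi i j + 1 := by
  rw [eVal, if_pos ⟨h1, h2, h3, hm⟩, dif_pos (by omega : 0 < i + 1 ∧ 0 < j + 1)]
  simp

theorem runBack_shift (a b : List Int) (alo blo : Nat) :
    ∀ n i j k, i + 1 - k ≤ n → 1 ≤ i → 1 ≤ j →
      runBack a b alo blo i j (k + 1) = runBack a b alo blo (i - 1) (j - 1) k + 1 := by
  intro n
  induction n with
  | zero =>
    intro i j k hn hi hj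
    rw [runBack, dif_neg (by omega)]
    conv_rhs => rw [runBack, dif_neg (by omega)]
  | succ n ih =>
    intro i j k hn hi hj
    by_cases hg : alo + (k + 1) ≤ i ∧ blo + (k + 1) ≤ j ∧ a.getD (i - (k + 1)) 0 = b.getD (j - (k + 1)) 0
    · have hg' : alo + k ≤ i - 1 ∧ blo + k ≤ j - 1 ∧ a.getD (i - 1 - k) 0 = b.getD (j - 1 - k) 0 := by
        have e1 : i - 1 - k = i - (k + 1) := by omega
        have e2 : j - 1 - k = j - (k + 1) := by omega
        exact ⟨by omega, by omega, by rw [e1, e2]; exact hg.2.2⟩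
      rw [runBack, dif_pos hg]
      conv_rhs => rw [runBack, dif_pos hg']
      exact ih i j (k + 1) (by omega) hi hj
    · have hg' : ¬ (alo + k ≤ i - 1 ∧ blo + k ≤ j - 1 ∧ a.getD (i - 1 - k) 0 = b.getD (j - 1 - k) 0) := by
        intro hc
        apply hg
        have e1 : i - 1 - k = i - (k + 1) := by omega
        have e2 : j - 1 - k = j - (k + 1) := by omega
        exact ⟨by omega, by omega, by rw [← e1, ← e2]; exact hc.2.2⟩
      rw [runBack, dif_neg hg, runBack, dif_neg hg']

theorem runBack_eq_eVal (a b : List Int) (alo blo bhi : Nat) :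
    ∀ i j, alo ≤ i → blo ≤ j → j < bhi → a.getD i 0 = b.getD j 0 →
      runBack a b alo blo i j 1 = eVal a b alo blo bhi i j := by
  intro i
  induction i using Nat.strong_induction_on with
  | _ i ih =>
    intro j hai hbj hjb hm
    rw [eVal, if_pos ⟨hai, hbj, hjb, hm⟩]
    by_cases hg : alo + 1 ≤ i ∧ blo + 1 ≤ j ∧ a.getD (i - 1) 0 = b.getD (j - 1) 0
    · rw [runBack, dif_pos hg]
      have hi1 : 1 ≤ i := by omega
      have hj1 : 1 ≤ j := by omega
      rw [runBack_shift a b alo blo (i + 1) i j 1 (by omega) hi1 hj1]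
      rw [ih (i - 1) (by omega) (j - 1) (by omega) (by omega) (by omega) hg.2.2]
      rw [dif_pos (by omega : 0 < i ∧ 0 < j)]
    · rw [runBack, dif_neg hg]
      by_cases hij : 0 < i ∧ 0 < j
      · rw [dif_pos hij]
        have : eVal a b alo blo bhi (i - 1) (j - 1) = 0 := by
          by_contra hne
          have hc := eVal_ne_zero_imp a b alo blo bhi (i - 1) (j - 1) hne
          exact hg ⟨by omega, by omega, hc.2.2.2⟩
        rw [this]
      · rw [dif_neg hij]

-- B's nested scan is the fold of updB over the candidate list
theorem inner_map_fold (a b : List Int) (alo blo bhi i : Nat) (hai : alo ≤ i) :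
    ∀ (l : List Nat) (init : Nat × Nat × Nat),
      (∀ j ∈ l, blo ≤ j ∧ j < bhi ∧ a.getD i 0 = b.getD j 0) →
      List.foldl (fun best j =>
          let k := runBack a b alo blo i j 1
          if best.2.2 < k then (i + 1 - k, j + 1 - k, k) else best) init l
        = List.foldl updB init (l.map (candE a b alo blo bhi i)) := by
  intro l
  induction l with
  | nil => intro init _; rfl
  | cons j t iht =>
    intro init hmem
    have hj := hmem j (List.mem_cons_self)
    rw [List.map_cons, List.foldl_cons, List.foldl_cons]
    rw [iht _ (fun x hx => hmem x (List.mem_cons_of_mem _ hx))]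
    congr 1
    show (if init.2.2 < runBack a b alo blo i j 1 then _ else init) = updB init (candE a b alo blo bhi i j)
    rw [runBack_eq_eVal a b alo blo bhi i j hai hj.1 hj.2.1 hj.2.2]
    rfl

theorem bestRun_eq_fold (a b : List Int) (alo ahi blo bhi : Nat) :
    bestRun a b alo ahi blo bhi = List.foldl updB (alo, blo, 0) (allCands a b alo ahi blo bhi) := by
  unfold bestRun allCands
  suffices H : ∀ n s init, alo ≤ s →
      List.foldl (fun best i => List.foldl (fun best j =>
          if a.getD i 0 = b.getD j 0 then
            let k := runBack a b alo blo i j 1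
            if best.2.2 < k then (i + 1 - k, j + 1 - k, k) else best
          else best) best (List.range' blo (bhi - blo))) init (List.range' s n)
        = List.foldl updB init ((List.range' s n).flatMap
            (fun i => (evs a b blo bhi i).map (candE a b alo blo bhi i))) by
    exact H (ahi - alo) alo (alo, blo, 0) le_rfl
  intro n
  induction n with
  | zero => intro s init _; rfl
  | succ n ih =>
    intro s init hs
    rw [List.range'_succ, List.flatMap_cons, List.foldl_cons, List.foldl_append]
    rw [ih (s + 1) _ (by omega)]
    congr 1
    rw [PySem.List.foldl_ite_eq_foldl_filter (fun j => a.getD s 0 = b.getD j 0)]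
    rw [inner_map_fold a b alo blo bhi s hs]
    · rfl
    · intro j hj
      rw [List.mem_filter] at hj
      have := List.mem_range'_1.mp hj.1
      exact ⟨by omega, by omega, by simpa using hj.2⟩

theorem foldl_updB_acc_le : ∀ (l : List (Nat × Nat × Nat)) (init : Nat × Nat × Nat),
    init.2.2 ≤ (List.foldl updB init l).2.2 := by
  intro l
  induction l with
  | nil => intro init; exact le_rfl
  | cons c t ih =>
    intro init
    refine le_trans ?_ (ih (updB init c))
    unfold updB; split <;> omega

theorem foldl_updB_mem_le : ∀ (l : List (Nat × Nat × Nat)) (init c : Nat × Nat × Nat),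
    c ∈ l → c.2.2 ≤ (List.foldl updB init l).2.2 := by
  intro l
  induction l with
  | nil => intro _ c h; cases h
  | cons d t ih =>
    intro init c hc
    rcases List.mem_cons.mp hc with rfl | hc'
    · refine le_trans ?_ (foldl_updB_acc_le t (updB init c))
      unfold updB; split <;> omega
    · exact ih _ c hc'

theorem foldl_updB_mem : ∀ (l : List (Nat × Nat × Nat)) (init : Nat × Nat × Nat),
    List.foldl updB init l = init ∨ List.foldl updB init l ∈ l := by
  intro l
  induction l with
  | nil => intro init; exact Or.inl rfl
  | cons c t ih =>
    intro init
    rcases ih (updB init c) with h | h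
    · rw [List.foldl_cons, h]
      unfold updB; split
      · exact Or.inr (List.mem_cons_self)
      · exact Or.inl rfl
    · exact Or.inr (List.mem_cons_of_mem _ h)


-- strictly increasing Nat lists with the same members are equal
theorem pairwise_lt_ext : ∀ (l₁ l₂ : List Nat), l₁.Pairwise (· < ·) → l₂.Pairwise (· < ·) →
    (∀ x, x ∈ l₁ ↔ x ∈ l₂) → l₁ = l₂ := by
  intro l₁
  induction l₁ with
  | nil =>
    intro l₂ _ _ hmem
    cases l₂ with
    | nil => rfl
    | cons y t => exact absurd ((hmem y).mpr List.mem_cons_self) (List.not_mem_nil)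
  | cons x t ih =>
    intro l₂ hp1 hp2 hmem
    cases l₂ with
    | nil => exact absurd ((hmem x).mp List.mem_cons_self) (List.not_mem_nil)
    | cons y u =>
      have hxy : x = y := by
        have hx2 : x ∈ y :: u := (hmem x).mp List.mem_cons_self
        have hy1 : y ∈ x :: t := (hmem y).mpr List.mem_cons_self
        rcases List.mem_cons.mp hx2 with h | h
        · exact h
        · rcases List.mem_cons.mp hy1 with h' | h'
          · exact h'.symm
          · have := (List.pairwise_cons.mp hp2).1 x h
            have := (List.pairwise_cons.mp hp1).1 y h'
            omega
      subst hxy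
      have htu : ∀ z, z ∈ t ↔ z ∈ u := by
        intro z
        constructor
        · intro hz
          have hlt := (List.pairwise_cons.mp hp1).1 z hz
          rcases List.mem_cons.mp ((hmem z).mp (List.mem_cons_of_mem _ hz)) with h | h
          · omega
          · exact h
        · intro hz
          have hlt := (List.pairwise_cons.mp hp2).1 z hz
          rcases List.mem_cons.mp ((hmem z).mpr (List.mem_cons_of_mem _ hz)) with h | h
          · omega
          · exact h
      rw [ih u hp1.tail hp2.tail htu]

-- ===== difflib's loops compute the same fold =====

def DictSpec (d : PySem.Dict Int Nat) (f : Nat → Nat) : Prop :=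
  (∀ j : Nat, d.getD (j : Int) 0 = f j) ∧ (∀ z : Int, z < 0 → d.getD z 0 = 0)

theorem DictSpec_congr {d : PySem.Dict Int Nat} {f g : Nat → Nat}
    (h : DictSpec d f) (hfg : ∀ j, f j = g j) : DictSpec d g :=
  ⟨fun j => (h.1 j).trans (hfg j), h.2⟩

theorem flmInner_spec (a b : List Int) (alo blo bhi i : Nat) (hai : alo ≤ i) :
    ∀ (js : List Nat) (j2len new : PySem.Dict Int Nat) (best : Nat × Nat × Nat) (procd : List Nat),
      js.Pairwise (· < ·) →
      (∀ x ∈ js, b.getD x 0 = a.getD i 0) →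
      DictSpec j2len (fun j => if alo < i then eVal a b alo blo bhi (i - 1) j else 0) →
      DictSpec new (fun j => if j ∈ procd then eVal a b alo blo bhi i j else 0) →
      (flmInner blo bhi i j2len js new best).2
          = List.foldl updB best
              ((js.filter (fun j => decide (blo ≤ j) && decide (j < bhi))).map (candE a b alo blo bhi i))
        ∧ DictSpec (flmInner blo bhi i j2len js new best).1
            (fun j => if j ∈ procd ++ js.filter (fun j => decide (blo ≤ j) && decide (j < bhi))
                      then eVal a b alo blo bhi i j else 0) := by
  intro js
  induction js with
  | nil =>
    intro j2len new best procd _ _ _ hnew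
    exact ⟨rfl, by simpa using hnew⟩
  | cons j t ih =>
    intro j2len new best procd hpw hsound hdict hnew
    by_cases h1 : j < blo
    · have hf : (decide (blo ≤ j) && decide (j < bhi)) = false := by
        simp [decide_eq_false_iff_not]; omega
      rw [List.filter_cons_of_neg (by simp [hf])]
      simp only [flmInner, if_pos h1]
      exact ih j2len new best procd hpw.tail (fun x hx => hsound x (List.mem_cons_of_mem _ hx)) hdict hnew
    · by_cases h2 : bhi ≤ j
      · have hfilt : (j :: t).filter (fun j => decide (blo ≤ j) && decide (j < bhi)) = [] := by
          rw [List.filter_eq_nil_iff]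
          intro x hx
          rcases List.mem_cons.mp hx with rfl | hx'
          · simp; omega
          · have := (List.pairwise_cons.mp hpw).1 x hx'
            simp; omega
        rw [hfilt]
        simp only [flmInner, if_neg h1, if_pos h2]
        exact ⟨rfl, by simpa using hnew⟩
      · -- processed column: blo ≤ j < bhi
        have hbj : blo ≤ j := by omega
        have hjb : j < bhi := by omega
        have hm : a.getD i 0 = b.getD j 0 := (hsound j List.mem_cons_self).symm
        have hguard : alo ≤ i ∧ blo ≤ j ∧ j < bhi ∧ a.getD i 0 = b.getD j 0 := ⟨hai, hbj, hjb, hm⟩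
        have hk : j2len.getD ((j : Int) - 1) 0 + 1 = eVal a b alo blo bhi i j := by
          rw [eVal, if_pos hguard]
          by_cases hj0 : 0 < j
          · have hcast : ((j : Int) - 1) = (((j - 1 : Nat)) : Int) := by omega
            rw [hcast, hdict.1 (j - 1)]
            beta_reduce
            by_cases hii : 0 < i
            · rw [dif_pos ⟨hii, hj0⟩]
              by_cases halo : alo < i
              · rw [if_pos halo]
              · rw [if_neg halo]
                have hi_eq : i = alo := by omega
                have : eVal a b alo blo bhi (i - 1) (j - 1) = 0 := by
                  by_contra hne
                  have hc := eVal_ne_zero_imp a b alo blo bhi (i - 1) (j - 1) hne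
                  omega
                rw [this]
            · rw [dif_neg (by omega)]
              rw [if_neg (by omega)]
          · have hj_eq : j = 0 := by omega
            subst hj_eq
            have hneg : ((0 : Nat) : Int) - 1 < 0 := by norm_num
            rw [hdict.2 _ hneg]
            rw [dif_neg (by omega)]
        have hfilt : (j :: t).filter (fun j => decide (blo ≤ j) && decide (j < bhi))
            = j :: t.filter (fun j => decide (blo ≤ j) && decide (j < bhi)) :=
          List.filter_cons_of_pos (by simp; omega)
        rw [hfilt, List.map_cons, List.foldl_cons]
        simp only [flmInner, if_neg h1, if_neg h2]
        have hnew' : DictSpec (new.insert (j : Int) (j2len.getD ((j : Int) - 1) 0 + 1))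
            (fun j' => if j' ∈ procd ++ [j] then eVal a b alo blo bhi i j' else 0) := by
          constructor
          · intro j'
            beta_reduce
            rw [hk, PySem.Dict.getD_insert]
            by_cases hjj : j' = j
            · subst hjj
              rw [if_pos rfl, if_pos (by simp)]
            · rw [if_neg (by exact_mod_cast hjj), hnew.1 j']
              beta_reduce
              by_cases hmem : j' ∈ procd
              · rw [if_pos hmem, if_pos (by simp [hmem])]
              · rw [if_neg hmem, if_neg (by simp [hmem, hjj])]
          · intro z hz
            rw [PySem.Dict.getD_insert, if_neg (by omega), hnew.2 z hz]
        have hstep := ih j2len (new.insert (j : Int) (j2len.getD ((j : Int) - 1) 0 + 1))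
            (updB best (candE a b alo blo bhi i j)) (procd ++ [j])
            hpw.tail (fun x hx => hsound x (List.mem_cons_of_mem _ hx)) hdict hnew'
        have harg : (if best.2.2 < j2len.getD ((j : Int) - 1) 0 + 1 then
              (i + 1 - (j2len.getD ((j : Int) - 1) 0 + 1), j + 1 - (j2len.getD ((j : Int) - 1) 0 + 1),
                j2len.getD ((j : Int) - 1) 0 + 1) else best)
            = updB best (candE a b alo blo bhi i j) := by
          rw [hk]; rfl
        rw [harg]
        refine ⟨hstep.1, DictSpec_congr hstep.2 ?_⟩
        intro j'
        have : (j' ∈ procd ++ [j] ++ t.filter (fun j => decide (blo ≤ j) && decide (j < bhi)))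
            ↔ (j' ∈ procd ++ j :: t.filter (fun j => decide (blo ≤ j) && decide (j < bhi))) := by
          simp [List.mem_append, List.mem_cons]
        by_cases hmem : j' ∈ procd ++ [j] ++ t.filter (fun j => decide (blo ≤ j) && decide (j < bhi))
        · rw [if_pos hmem, if_pos (this.mp hmem)]
        · rw [if_neg hmem, if_neg (fun hc => hmem (this.mpr hc))]

theorem b2jGet_pairwise (b : List Int) (x : Int) : (b2jGet b x).Pairwise (· < ·) :=
  List.Pairwise.sublist List.filter_sublist List.pairwise_lt_range

theorem b2jGet_sound (b : List Int) (x : Int) :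
    ∀ j ∈ b2jGet b x, b.getD j 0 = x ∧ j < b.length := by
  intro j hj
  unfold b2jGet at hj
  rw [List.mem_filter] at hj
  exact ⟨by simpa using hj.2, by simpa using List.mem_range.mp hj.1⟩

theorem b2jGet_complete (b : List Int) (x : Int) (j : Nat)
    (hlen : j < b.length) (hval : b.getD j 0 = x) : j ∈ b2jGet b x := by
  unfold b2jGet
  rw [List.mem_filter]
  exact ⟨List.mem_range.mpr hlen, by simpa using hval⟩

theorem flmOuter_spec (a b : List Int) (alo blo bhi : Nat) (hbl : bhi ≤ b.length) :
    ∀ (n s : Nat) (j2len : PySem.Dict Int Nat) (best : Nat × Nat × Nat), alo ≤ s →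
      DictSpec j2len (fun j => if alo < s then eVal a b alo blo bhi (s - 1) j else 0) →
      flmOuter a b blo bhi (List.range' s n) j2len best
        = List.foldl updB best ((List.range' s n).flatMap
            (fun r => (evs a b blo bhi r).map (candE a b alo blo bhi r))) := by
  intro n
  induction n with
  | zero => intro s j2len best _ _; rfl
  | succ n ih =>
    intro s j2len best hs hdict
    rw [List.range'_succ, List.flatMap_cons, List.foldl_append]
    simp only [flmOuter]
    have hempty : DictSpec (PySem.Dict.ofList [] : PySem.Dict Int Nat)
        (fun j => if j ∈ ([] : List Nat) then eVal a b alo blo bhi s j else 0) :=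
      ⟨fun j => by simp [show ((PySem.Dict.ofList [] : PySem.Dict Int Nat).getD (j : Int) 0) = 0 from rfl],
       fun z _ => rfl⟩
    have hspec := flmInner_spec a b alo blo bhi s hs (b2jGet b (a.getD s 0)) j2len
        (PySem.Dict.ofList []) best [] (b2jGet_pairwise b _)
        (fun x hx => (b2jGet_sound b _ x hx).1) hdict hempty
    have hlists : (b2jGet b (a.getD s 0)).filter (fun j => decide (blo ≤ j) && decide (j < bhi))
        = evs a b blo bhi s := by
      have hpw1 : (((b2jGet b (a.getD s 0)).filter (fun j => decide (blo ≤ j) && decide (j < bhi)))).Pairwise (· < ·) :=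
        List.Pairwise.sublist List.filter_sublist (b2jGet_pairwise b _)
      have hpw2 : (evs a b blo bhi s).Pairwise (· < ·) :=
        List.Pairwise.sublist List.filter_sublist (List.pairwise_lt_range' 1)
      have hmem : ∀ x, (x ∈ (b2jGet b (a.getD s 0)).filter (fun j => decide (blo ≤ j) && decide (j < bhi)))
          ↔ x ∈ evs a b blo bhi s := by
        intro x
        rw [List.mem_filter]
        unfold evs
        rw [List.mem_filter, List.mem_range'_1]
        constructor
        · intro ⟨hx1, hx2⟩
          have hs' := b2jGet_sound b _ x hx1
          simp only [decide_eq_true_eq, Bool.and_eq_true] at hx2 ⊢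
          exact ⟨⟨hx2.1, by omega⟩, hs'.1.symm⟩
        · intro ⟨hx1, hx2⟩
          simp only [decide_eq_true_eq, Bool.and_eq_true] at hx2 ⊢
          refine ⟨b2jGet_complete b _ x (by omega) (by simpa using hx2.symm), ?_, by omega⟩
          omega
      exact pairwise_lt_ext _ _ hpw1 hpw2 hmem
    rw [ih (s + 1) _ _ (by omega) ?_]
    · congr 1
      rw [hspec.1, hlists]
    · refine DictSpec_congr hspec.2 ?_
      intro j
      rw [if_pos (by omega : alo < s + 1)]
      have hsub : s + 1 - 1 = s := by omega
      rw [hsub]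
      by_cases hmem : j ∈ ([] : List Nat) ++ (b2jGet b (a.getD s 0)).filter (fun j => decide (blo ≤ j) && decide (j < bhi))
      · rw [if_pos hmem]
      · rw [if_neg hmem]
        by_contra hne
        have hg := eVal_ne_zero_imp a b alo blo bhi s j (fun hc => hne hc.symm)
        apply hmem
        simp only [List.nil_append, List.mem_filter]
        exact ⟨b2jGet_complete b _ j (by omega) hg.2.2.2.symm, by simp; omega⟩


theorem allCands_mem (a b : List Int) (alo ahi blo bhi : Nat) (c : Nat × Nat × Nat) :
    c ∈ allCands a b alo ahi blo bhi ↔ ∃ i j, (alo ≤ i ∧ i < ahi) ∧ (blo ≤ j ∧ j < bhi) ∧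
      a.getD i 0 = b.getD j 0 ∧ c = candE a b alo blo bhi i j := by
  unfold allCands evs
  rw [List.mem_flatMap]
  constructor
  · intro ⟨i, hi, hmap⟩
    rw [List.mem_map] at hmap
    obtain ⟨j, hj, hc⟩ := hmap
    rw [List.mem_filter, List.mem_range'_1] at hj
    have hi' := List.mem_range'_1.mp hi
    exact ⟨i, j, ⟨by omega, by omega⟩, ⟨by omega, by omega⟩, by simpa using hj.2, hc.symm⟩
  · intro ⟨i, j, hi, hj, hm, hc⟩
    refine ⟨i, List.mem_range'_1.mpr (by omega), List.mem_map.mpr ⟨j, ?_, hc.symm⟩⟩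
    rw [List.mem_filter, List.mem_range'_1]
    exact ⟨by omega, by simpa using hm⟩

theorem flm_eq (a b : List Int) (alo ahi blo bhi : Nat) (hbl : bhi ≤ b.length) :
    findLongestMatch a b alo ahi blo bhi = bestRun a b alo ahi blo bhi := by
  have hd0 : DictSpec (PySem.Dict.ofList [] : PySem.Dict Int Nat)
      (fun j => if alo < alo then eVal a b alo blo bhi (alo - 1) j else 0) :=
    ⟨fun j => by
        beta_reduce
        rw [if_neg (lt_irrefl alo)]
        rfl,
     fun z _ => rfl⟩
  have hout := flmOuter_spec a b alo blo bhi hbl (ahi - alo) alo (PySem.Dict.ofList []) (alo, blo, 0) le_rfl hd0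
  have hfold : flmOuter a b blo bhi (List.range' alo (ahi - alo)) (PySem.Dict.ofList []) (alo, blo, 0)
      = bestRun a b alo ahi blo bhi := by
    rw [hout, bestRun_eq_fold]
    rfl
  have hmemchar := foldl_updB_mem (allCands a b alo ahi blo bhi) (alo, blo, 0)
  rw [← bestRun_eq_fold] at hmemchar
  have hmax : ∀ c ∈ allCands a b alo ahi blo bhi, c.2.2 ≤ (bestRun a b alo ahi blo bhi).2.2 := by
    intro c hc
    rw [bestRun_eq_fold]
    exact foldl_updB_mem_le _ _ c hc
  rcases hre : bestRun a b alo ahi blo bhi with ⟨ri, rj, rk⟩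
  rw [hre] at hmemchar hmax
  have hgL : ¬ (alo < ri ∧ blo < rj ∧ a.getD (ri - 1) 0 = b.getD (rj - 1) 0) := by
    intro hguard
    rcases hmemchar with heq | hmem
    · rw [Prod.mk.injEq, Prod.mk.injEq] at heq
      omega
    · rw [allCands_mem] at hmem
      obtain ⟨i, j, hi, hj, hm, hc⟩ := hmem
      rw [candE, Prod.mk.injEq, Prod.mk.injEq] at hc
      obtain ⟨h1, h2, h3⟩ := hc
      have hpos : 1 ≤ eVal a b alo blo bhi i j := eVal_pos a b alo blo bhi i j ⟨hi.1, hj.1, hj.2, hm⟩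
      have hle := eVal_le a b alo blo bhi i j hpos
      have hKi : alo + eVal a b alo blo bhi i j ≤ i := by omega
      have hKj : blo + eVal a b alo blo bhi i j ≤ j := by omega
      have hmatch : a.getD (i - eVal a b alo blo bhi i j) 0 = b.getD (j - eVal a b alo blo bhi i j) 0 := by
        have e1 : ri - 1 = i - eVal a b alo blo bhi i j := by omega
        have e2 : rj - 1 = j - eVal a b alo blo bhi i j := by omega
        rw [← e1, ← e2]
        exact hguard.2.2
      exact eVal_noextend a b alo blo bhi (eVal a b alo blo bhi i j) i j hj.2 hKi hKj hmatch rfl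
  have hgR : ¬ (ri + rk < ahi ∧ rj + rk < bhi ∧ a.getD (ri + rk) 0 = b.getD (rj + rk) 0) := by
    intro hguard
    rcases hmemchar with heq | hmem
    · rw [Prod.mk.injEq, Prod.mk.injEq] at heq
      obtain ⟨e1, e2, e3⟩ := heq
      have ha : ri + rk = alo := by omega
      have hb : rj + rk = blo := by omega
      have hm0 : a.getD alo 0 = b.getD blo 0 := by rw [← ha, ← hb]; exact hguard.2.2
      have hcand : candE a b alo blo bhi alo blo ∈ allCands a b alo ahi blo bhi :=
        (allCands_mem a b alo ahi blo bhi _).mpr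
          ⟨alo, blo, ⟨le_rfl, by omega⟩, ⟨le_rfl, by omega⟩, hm0, rfl⟩
      have hmx := hmax _ hcand
      have hp := eVal_pos a b alo blo bhi alo blo ⟨le_rfl, le_rfl, by omega, hm0⟩
      rw [candE] at hmx
      simp at hmx
      omega
    · rw [allCands_mem] at hmem
      obtain ⟨i, j, hi, hj, hm, hc⟩ := hmem
      rw [candE, Prod.mk.injEq, Prod.mk.injEq] at hc
      obtain ⟨h1, h2, h3⟩ := hc
      have hpos : 1 ≤ eVal a b alo blo bhi i j := eVal_pos a b alo blo bhi i j ⟨hi.1, hj.1, hj.2, hm⟩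
      have hle := eVal_le a b alo blo bhi i j hpos
      have e1 : ri + rk = i + 1 := by omega
      have e2 : rj + rk = j + 1 := by omega
      have hmatch : a.getD (i + 1) 0 = b.getD (j + 1) 0 := by
        rw [← e1, ← e2]; exact hguard.2.2
      have hsucc := eVal_succ a b alo blo bhi i j (by omega) (by omega) (by omega) hmatch
      have hcand : candE a b alo blo bhi (i + 1) (j + 1) ∈ allCands a b alo ahi blo bhi :=
        (allCands_mem a b alo ahi blo bhi _).mpr
          ⟨i + 1, j + 1, ⟨by omega, by omega⟩, ⟨by omega, by omega⟩, hmatch, rfl⟩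
      have hmx := hmax _ hcand
      rw [candE] at hmx
      simp only [hsucc] at hmx
      omega
  have hL : extendLeft a b alo blo ri rj rk = (ri, rj, rk) := by
    rw [extendLeft, if_neg hgL]
  have hR : extendRight a b ahi bhi ri rj rk = rk := by
    rw [extendRight, if_neg hgR]
  unfold findLongestMatch
  rw [hfold, hre]
  simp only [hL, hR]


-- ===== PART 2: queue + sort + merge + opcodes = in-order recursion =====

-- the matching blocks of a window, in left-to-right order (the queue collects
-- exactly these, in some order; sorting recovers this order)
def collectW (a b : List Int) (alo ahi blo bhi : Nat) : List (Nat × Nat × Nat) :=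
  let r := bestRun a b alo ahi blo bhi
  if h : r.2.2 = 0 then []
  else collectW a b alo r.1 blo r.2.1 ++ r :: collectW a b (r.1 + r.2.2) ahi (r.2.1 + r.2.2) bhi
termination_by (ahi - alo) + (bhi - blo)
decreasing_by
  · have hb := bestRun_bounds a b alo ahi blo bhi h
    omega
  · have hb := bestRun_bounds a b alo ahi blo bhi h
    omega

-- cursor walk over a block list (A's opcode pass flattens to this)
def altWalk (a b : List Int) : List (Nat × Nat × Nat) → Nat → Nat → List Int
  | [], _, _ => []
  | (ai, bj, size) :: rest, i1, j1 =>
    sliceN a i1 ai ++ sliceN b j1 bj ++ sliceN a ai (ai + size) ++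
    altWalk a b rest (ai + size) (bj + size)

theorem sliceN_empty (xs : List Int) {lo hi : Nat} (h : hi ≤ lo) : sliceN xs lo hi = [] := by
  simp [sliceN, Nat.sub_eq_zero_of_le h]

theorem sliceN_append (xs : List Int) {lo mid hi : Nat} (h1 : lo ≤ mid) (h2 : mid ≤ hi) :
    sliceN xs lo mid ++ sliceN xs mid hi = sliceN xs lo hi := by
  unfold sliceN
  have hd : xs.drop mid = (xs.drop lo).drop (mid - lo) := by
    rw [List.drop_drop]
    congr 1
    omega
  rw [hd, ← List.take_add]
  congr 1
  omega

-- A's opcode walk over any block list equals the cursor walk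
theorem walk_eq (a b : List Int) (blocks : List (Nat × Nat × Nat)) :
    ∀ i j : Nat, (opcodesLoop blocks i j).flatMap (emitOne a b) = altWalk a b blocks i j := by
  induction blocks with
  | nil => intro i j; rfl
  | cons hd rest ih =>
    obtain ⟨ai, bj, size⟩ := hd
    intro i j
    simp only [opcodesLoop, altWalk, List.flatMap_append, ih]
    by_cases hi : i < ai <;> by_cases hj : j < bj <;> by_cases hs : size = 0 <;>
      simp_all [emitOne, sliceN_empty] <;>
      first
        | (rw [if_neg (show ¬ j < bj by omega)]; simp [emitOne])
        | (rw [if_neg (show ¬ i < ai by omega)]; simp [emitOne])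

theorem bestRun_degenerate (a b : List Int) (alo ahi blo bhi : Nat)
    (h : ahi ≤ alo ∨ bhi ≤ blo) : (bestRun a b alo ahi blo bhi).2.2 = 0 := by
  unfold bestRun
  rcases h with h | h
  · rw [show ahi - alo = 0 by omega]
    rfl
  · rw [show bhi - blo = 0 by omega]
    have : ∀ (l : List Nat) (init : Nat × Nat × Nat),
        List.foldl (fun best i => List.foldl (fun best j =>
          if a.getD i 0 = b.getD j 0 then
            let k := runBack a b alo blo i j 1
            if best.2.2 < k then (i + 1 - k, j + 1 - k, k) else best
          else best) best (List.range' blo 0)) init l = init := by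
      intro l
      induction l with
      | nil => intro init; rfl
      | cons x t iht => intro init; rw [List.foldl_cons]; exact iht init
    rw [this]

theorem collectW_bounds (a b : List Int) :
    ∀ (N alo ahi blo bhi : Nat), (ahi - alo) + (bhi - blo) ≤ N →
      ∀ x ∈ collectW a b alo ahi blo bhi,
        1 ≤ x.2.2 ∧ alo ≤ x.1 ∧ x.1 + x.2.2 ≤ ahi ∧ blo ≤ x.2.1 ∧ x.2.1 + x.2.2 ≤ bhi := by
  intro N
  induction N with
  | zero =>
    intro alo ahi blo bhi hN x hx
    rw [collectW] at hx
    split at hx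
    · cases hx
    · rename_i h0
      have hb := bestRun_bounds a b alo ahi blo bhi h0
      omega
  | succ N ih =>
    intro alo ahi blo bhi hN x hx
    rw [collectW] at hx
    split at hx
    · cases hx
    · rename_i h0
      have hb := bestRun_bounds a b alo ahi blo bhi h0
      rcases List.mem_append.mp hx with hL | hR
      · have := ih alo (bestRun a b alo ahi blo bhi).1 blo (bestRun a b alo ahi blo bhi).2.1
          (by omega) x hL
        omega
      · rcases List.mem_cons.mp hR with rfl | hR'
        · omega
        · have := ih ((bestRun a b alo ahi blo bhi).1 + (bestRun a b alo ahi blo bhi).2.2) ahi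
            ((bestRun a b alo ahi blo bhi).2.1 + (bestRun a b alo ahi blo bhi).2.2) bhi
            (by omega) x hR'
          omega

theorem collectW_pairwise (a b : List Int) :
    ∀ (N alo ahi blo bhi : Nat), (ahi - alo) + (bhi - blo) ≤ N →
      (collectW a b alo ahi blo bhi).Pairwise (fun x y => x.1 < y.1) := by
  intro N
  induction N with
  | zero =>
    intro alo ahi blo bhi hN
    rw [collectW]
    split
    · exact List.Pairwise.nil
    · rename_i h0
      have hb := bestRun_bounds a b alo ahi blo bhi h0
      omega
  | succ N ih =>
    intro alo ahi blo bhi hN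
    rw [collectW]
    split
    · exact List.Pairwise.nil
    · rename_i h0
      have hb := bestRun_bounds a b alo ahi blo bhi h0
      rw [List.pairwise_append]
      refine ⟨ih _ _ _ _ (by omega), List.pairwise_cons.mpr ⟨?_, ih _ _ _ _ (by omega)⟩, ?_⟩
      · intro y hy
        have := collectW_bounds a b N _ _ _ _ (by omega) y hy
        omega
      · intro x hx y hy
        have hxb := collectW_bounds a b N _ _ _ _ (by omega) x hx
        rcases List.mem_cons.mp hy with rfl | hy'
        · omega
        · have hyb := collectW_bounds a b N _ _ _ _ (by omega) y hy'
          omega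

def wmeas (w : Nat × Nat × Nat × Nat) : Nat := (w.2.1 - w.1) + (w.2.2.2 - w.2.2.1) + 1

theorem perm_of_eq {α : Type} {l₁ l₂ : List α} (h : l₁ = l₂) : l₁.Perm l₂ := h ▸ List.Perm.refl _

theorem gmb_perm (a b : List Int) :
    ∀ (fuel : Nat) (ws : List (Nat × Nat × Nat × Nat)) (acc : List (Nat × Nat × Nat)),
      (ws.map wmeas).sum ≤ fuel →
      (∀ w ∈ ws, w.2.2.2 ≤ b.length) →
      (gmbQueue a b fuel ws acc).Perm
        (acc ++ (ws.map (fun w => collectW a b w.1 w.2.1 w.2.2.1 w.2.2.2)).flatten) := by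
  intro fuel
  induction fuel with
  | zero =>
    intro ws acc hfuel hws
    cases ws with
    | nil => simp [gmbQueue]
    | cons w rest =>
      exfalso
      have h1 : (List.map wmeas (w :: rest)).sum = wmeas w + (rest.map wmeas).sum := by simp
      have h2 : 1 ≤ wmeas w := by unfold wmeas; omega
      omega
  | succ fuel ih =>
    intro ws acc hfuel hws
    cases ws with
    | nil => simp [gmbQueue]
    | cons w rest =>
      obtain ⟨alo, ahi, blo, bhi⟩ := w
      have hbl : bhi ≤ b.length := by simpa using hws (alo, ahi, blo, bhi) List.mem_cons_self
      have hflm : findLongestMatch a b alo ahi blo bhi = bestRun a b alo ahi blo bhi :=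
        flm_eq a b alo ahi blo bhi hbl
      rw [List.map_cons, List.flatten_cons]
      simp only [gmbQueue, hflm]
      have hfuel' : wmeas (alo, ahi, blo, bhi) + (rest.map wmeas).sum ≤ fuel + 1 := by
        simpa [wmeas] using hfuel
      by_cases h0 : (bestRun a b alo ahi blo bhi).2.2 ≠ 0
      · rw [if_pos h0]
        have hb := bestRun_bounds a b alo ahi blo bhi (by omega)
        have hcol : collectW a b alo ahi blo bhi
            = collectW a b alo (bestRun a b alo ahi blo bhi).1 blo (bestRun a b alo ahi blo bhi).2.1
              ++ bestRun a b alo ahi blo bhi ::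
                collectW a b ((bestRun a b alo ahi blo bhi).1 + (bestRun a b alo ahi blo bhi).2.2) ahi
                  ((bestRun a b alo ahi blo bhi).2.1 + (bestRun a b alo ahi blo bhi).2.2) bhi := by
          rw [collectW, dif_neg h0]
        set r := bestRun a b alo ahi blo bhi with hr
        set CL := collectW a b alo r.1 blo r.2.1 with hCL
        set CR := collectW a b (r.1 + r.2.2) ahi (r.2.1 + r.2.2) bhi with hCR
        have hmL : wmeas (alo, r.1, blo, r.2.1) = (r.1 - alo) + (r.2.1 - blo) + 1 := rfl
        have hmR : wmeas (r.1 + r.2.2, ahi, r.2.1 + r.2.2, bhi)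
            = (ahi - (r.1 + r.2.2)) + (bhi - (r.2.1 + r.2.2)) + 1 := rfl
        have hmW : wmeas (alo, ahi, blo, bhi) = (ahi - alo) + (bhi - blo) + 1 := rfl
        by_cases hpl : alo < r.1 ∧ blo < r.2.1 <;> by_cases hpr : r.1 + r.2.2 < ahi ∧ r.2.1 + r.2.2 < bhi
        · rw [if_pos hpl, if_pos hpr]
          have hstep := ih ((r.1 + r.2.2, ahi, r.2.1 + r.2.2, bhi) :: (alo, r.1, blo, r.2.1) :: rest)
            (acc ++ [r])
            (by simp only [List.map_cons, List.sum_cons, hmL, hmR]; omega)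
            (by intro w hw
                rcases List.mem_cons.mp hw with rfl | hw'
                · exact hbl
                rcases List.mem_cons.mp hw' with rfl | hw''
                · show r.2.1 ≤ b.length; omega
                · exact hws w (List.mem_cons_of_mem _ hw''))
          refine hstep.trans ?_
          rw [hcol]
          refine (perm_of_eq ?e1).trans ((List.Perm.append_left acc
            (List.Perm.append_right ((rest.map (fun w => collectW a b w.1 w.2.1 w.2.2.1 w.2.2.2)).flatten)
              (List.perm_append_comm (l₁ := [r] ++ CR) (l₂ := CL)))).trans (perm_of_eq ?e2))
          case e1 => simp [List.append_assoc, ← hCL, ← hCR]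
          case e2 => simp [List.append_assoc, ← hCL, ← hCR]
        · rw [if_pos hpl, if_neg hpr]
          have hCRnil : CR = [] := by
            rw [hCR, collectW, dif_pos (bestRun_degenerate a b _ _ _ _ (by omega))]
          have hstep := ih ((alo, r.1, blo, r.2.1) :: rest) (acc ++ [r])
            (by simp only [List.map_cons, List.sum_cons, hmL]; omega)
            (by intro w hw
                rcases List.mem_cons.mp hw with rfl | hw'
                · show r.2.1 ≤ b.length; omega
                · exact hws w (List.mem_cons_of_mem _ hw'))
          refine hstep.trans ?_
          rw [hcol, hCRnil]
          refine (perm_of_eq ?e3).trans ((List.Perm.append_left acc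
            (List.Perm.append_right ((rest.map (fun w => collectW a b w.1 w.2.1 w.2.2.1 w.2.2.2)).flatten)
              (List.perm_append_comm (l₁ := [r]) (l₂ := CL)))).trans (perm_of_eq ?e4))
          case e3 => simp [List.append_assoc, ← hCL, ← hCR]
          case e4 => simp [List.append_assoc, ← hCL, ← hCR]
        · rw [if_neg hpl, if_pos hpr]
          have hCLnil : CL = [] := by
            rw [hCL, collectW, dif_pos (bestRun_degenerate a b _ _ _ _ (by omega))]
          have hstep := ih ((r.1 + r.2.2, ahi, r.2.1 + r.2.2, bhi) :: rest) (acc ++ [r])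
            (by simp only [List.map_cons, List.sum_cons, hmR]; omega)
            (by intro w hw
                rcases List.mem_cons.mp hw with rfl | hw'
                · exact hbl
                · exact hws w (List.mem_cons_of_mem _ hw'))
          refine hstep.trans ?_
          rw [hcol, hCLnil]
          exact perm_of_eq (by simp [List.append_assoc, ← hCR])
        · rw [if_neg hpl, if_neg hpr]
          have hCLnil : CL = [] := by
            rw [hCL, collectW, dif_pos (bestRun_degenerate a b _ _ _ _ (by omega))]
          have hCRnil : CR = [] := by
            rw [hCR, collectW, dif_pos (bestRun_degenerate a b _ _ _ _ (by omega))]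
          have hstep := ih rest (acc ++ [r]) (by omega)
            (fun w hw => hws w (List.mem_cons_of_mem _ hw))
          refine hstep.trans ?_
          rw [hcol, hCLnil, hCRnil]
          exact perm_of_eq (by simp [List.append_assoc])

      · rw [if_neg h0]
        have hcol : collectW a b alo ahi blo bhi = [] := by
          rw [collectW, dif_pos (by omega)]
        have hstep := ih rest acc (by have := hfuel'; simp only [wmeas] at this; omega)
          (fun w hw => hws w (List.mem_cons_of_mem _ hw))
        refine hstep.trans ?_
        rw [hcol]
        exact perm_of_eq (by simp)


theorem sorted_blocks_unique :
    ∀ (l₁ l₂ : List (Nat × Nat × Nat)), l₁.Perm l₂ →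
      l₁.Pairwise (fun x y => (! lexLt y x) = true) →
      l₂.Pairwise (fun x y => x.1 < y.1) → l₁ = l₂ := by
  intro l₁
  induction l₁ with
  | nil =>
    intro l₂ hp _ _
    exact (hp.symm.eq_nil).symm
  | cons h₁ t₁ ih =>
    intro l₂ hperm hp1 hp2
    cases l₂ with
    | nil => exact absurd hperm.eq_nil (by simp)
    | cons h₂ t₂ =>
      have hh : h₁ = h₂ := by
        by_contra hne
        have h1mem : h₁ ∈ h₂ :: t₂ := hperm.subset List.mem_cons_self
        have h2mem : h₂ ∈ h₁ :: t₁ := hperm.symm.subset List.mem_cons_self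
        have h1t2 : h₁ ∈ t₂ := by
          rcases List.mem_cons.mp h1mem with h | h
          · exact absurd h hne
          · exact h
        have h2t1 : h₂ ∈ t₁ := by
          rcases List.mem_cons.mp h2mem with h | h
          · exact absurd h.symm hne
          · exact h
        have hlt : h₂.1 < h₁.1 := (List.pairwise_cons.mp hp2).1 h₁ h1t2
        have hle := (List.pairwise_cons.mp hp1).1 h₂ h2t1
        simp [lexLt] at hle
        omega
      subst hh
      rw [ih t₂ hperm.cons_inv hp1.tail hp2.tail]

theorem sortBlocks_eq (l tgt : List (Nat × Nat × Nat)) (hperm : l.Perm tgt)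
    (htgt : tgt.Pairwise (fun x y => x.1 < y.1)) : sortBlocks l = tgt := by
  apply sorted_blocks_unique
  · exact (List.mergeSort_perm l _).trans hperm
  · apply List.sorted_mergeSort
    · intro x y z hxy hyz
      simp [lexLt] at hxy hyz ⊢
      omega
    · intro x y
      simp [lexLt]
      omega
  · exact htgt

theorem altWalk_append_congr (a b : List Int) (pre : List (Nat × Nat × Nat))
    {l₁ l₂ : List (Nat × Nat × Nat)}
    (h : ∀ i j, altWalk a b l₁ i j = altWalk a b l₂ i j) :
    ∀ i j, altWalk a b (pre ++ l₁) i j = altWalk a b (pre ++ l₂) i j := by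
  induction pre with
  | nil => exact h
  | cons hd t ih =>
    intro i j
    obtain ⟨ai, bj, sz⟩ := hd
    simp only [List.cons_append, altWalk]
    rw [ih]

theorem altWalk_merge (a b : List Int) (i1 j1 k1 k2 : Nat) (rest : List (Nat × Nat × Nat)) :
    ∀ i j, altWalk a b ((i1, j1, k1) :: (i1 + k1, j1 + k1, k2) :: rest) i j
         = altWalk a b ((i1, j1, k1 + k2) :: rest) i j := by
  intro i j
  simp only [altWalk]
  rw [sliceN_empty a (le_refl (i1 + k1)), sliceN_empty b (le_refl (j1 + k1))]
  have h1 : i1 + k1 + k2 = i1 + (k1 + k2) := by omega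
  have h2 : j1 + k1 + k2 = j1 + (k1 + k2) := by omega
  rw [h1, h2, ← sliceN_append a (Nat.le_add_right i1 k1) (by omega : i1 + k1 ≤ i1 + (k1 + k2))]
  simp [List.append_assoc]

theorem mergeAdj_walk (a b : List Int) :
    ∀ (blocks : List (Nat × Nat × Nat)) (i1 j1 k1 : Nat) (acc tail : List (Nat × Nat × Nat)),
      1 ≤ k1 → (∀ x ∈ blocks, 1 ≤ x.2.2) → ∀ i j,
      altWalk a b (mergeAdj blocks (i1, j1, k1) acc ++ tail) i j
        = altWalk a b (acc ++ (i1, j1, k1) :: blocks ++ tail) i j := by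
  intro blocks
  induction blocks with
  | nil =>
    intro i1 j1 k1 acc tail hk _ i j
    simp [mergeAdj, if_pos (by omega : k1 ≠ 0), List.append_assoc]
  | cons hd rest ih =>
    intro i1 j1 k1 acc tail hk hbl i j
    obtain ⟨i2, j2, k2⟩ := hd
    simp only [mergeAdj]
    by_cases hadj : i1 + k1 = i2 ∧ j1 + k1 = j2
    · rw [if_pos hadj]
      rw [ih i1 j1 (k1 + k2) acc tail (by omega) (fun x hx => hbl x (List.mem_cons_of_mem _ hx)) i j]
      have hcore : ∀ i' j', altWalk a b ((i1, j1, k1 + k2) :: (rest ++ tail)) i' j'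
          = altWalk a b ((i1, j1, k1) :: ((i2, j2, k2) :: (rest ++ tail))) i' j' := by
        intro i' j'
        obtain ⟨ha1, ha2⟩ := hadj
        subst ha1
        subst ha2
        exact (altWalk_merge a b i1 j1 k1 k2 (rest ++ tail) i' j').symm
      simp only [List.cons_append, List.append_assoc]
      exact altWalk_append_congr a b acc hcore i j
    · rw [if_neg hadj, if_pos (by omega : k1 ≠ 0)]
      rw [ih i2 j2 k2 (acc ++ [(i1, j1, k1)]) tail (hbl _ List.mem_cons_self)
          (fun x hx => hbl x (List.mem_cons_of_mem _ hx)) i j]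
      simp [List.append_assoc]

theorem mergeAdj_walk_init (a b : List Int) (blocks tail : List (Nat × Nat × Nat))
    (hbl : ∀ x ∈ blocks, 1 ≤ x.2.2) :
    altWalk a b (mergeAdj blocks (0, 0, 0) [] ++ tail) 0 0 = altWalk a b (blocks ++ tail) 0 0 := by
  cases blocks with
  | nil => simp [mergeAdj]
  | cons hd rest =>
    obtain ⟨i2, j2, k2⟩ := hd
    have hk2 : 1 ≤ k2 := hbl _ List.mem_cons_self
    simp only [mergeAdj]
    by_cases hadj : 0 + 0 = i2 ∧ 0 + 0 = j2
    · rw [if_pos hadj]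
      rw [mergeAdj_walk a b rest 0 0 (0 + k2) [] tail (by omega)
          (fun x hx => hbl x (List.mem_cons_of_mem _ hx)) 0 0]
      have hi2 : i2 = 0 := by omega
      have hj2 : j2 = 0 := by omega
      subst hi2
      subst hj2
      simp
    · rw [if_neg hadj, if_neg (by simp)]
      rw [mergeAdj_walk a b rest i2 j2 k2 [] tail hk2
          (fun x hx => hbl x (List.mem_cons_of_mem _ hx)) 0 0]
      simp

theorem altWalk_collect (a b : List Int) :
    ∀ (N alo ahi blo bhi kk : Nat) (rest : List (Nat × Nat × Nat)),
      (ahi - alo) + (bhi - blo) ≤ N →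
      altWalk a b (collectW a b alo ahi blo bhi ++ (ahi, bhi, kk) :: rest) alo blo
        = walkB a b alo ahi blo bhi ++ altWalk a b ((ahi, bhi, kk) :: rest) ahi bhi := by
  intro N
  induction N with
  | zero =>
    intro alo ahi blo bhi kk rest hN
    have hdeg := bestRun_degenerate a b alo ahi blo bhi (by omega)
    rw [collectW, dif_pos hdeg, walkB, dif_pos hdeg]
    simp only [List.nil_append, altWalk]
    rw [sliceN_empty a (le_refl ahi), sliceN_empty b (le_refl bhi)]
    simp [List.append_assoc]
  | succ N ih =>
    intro alo ahi blo bhi kk rest hN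
    by_cases h0 : (bestRun a b alo ahi blo bhi).2.2 = 0
    · rw [collectW, dif_pos h0, walkB, dif_pos h0]
      simp only [List.nil_append, altWalk]
      rw [sliceN_empty a (le_refl ahi), sliceN_empty b (le_refl bhi)]
      simp [List.append_assoc]
    · have hb := bestRun_bounds a b alo ahi blo bhi h0
      rw [collectW, dif_neg h0, walkB, dif_neg h0]
      rcases hrx : bestRun a b alo ahi blo bhi with ⟨ri, rj, rk⟩
      rw [hrx] at hb
      try dsimp only at hb
      simp only [hrx]
      try dsimp only
      have hshape : (collectW a b alo ri blo rj ++ (ri, rj, rk) :: collectW a b (ri + rk) ahi (rj + rk) bhi)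
            ++ (ahi, bhi, kk) :: rest
          = collectW a b alo ri blo rj ++ (ri, rj, rk)
            :: (collectW a b (ri + rk) ahi (rj + rk) bhi ++ (ahi, bhi, kk) :: rest) := by
        simp [List.append_assoc]
      rw [hshape]
      rw [ih alo ri blo rj rk (collectW a b (ri + rk) ahi (rj + rk) bhi ++ (ahi, bhi, kk) :: rest)
          (by omega)]
      simp only [altWalk]
      rw [sliceN_empty a (le_refl ri), sliceN_empty b (le_refl rj)]
      rw [ih (ri + rk) ahi (rj + rk) bhi kk rest (by omega)]
      simp [altWalk, List.append_assoc]

-- ===== VERDICT (by name: the statement is the Claim_ definition above) =====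
theorem diff_iter_spec : Claim_equal_diff_iter := by
  intro a b _
  unfold Spec_diff_iter diff_iter diff_iter_alt
  rw [walk_eq]
  unfold getMatchingBlocks
  have hperm : (gmbQueue a b (a.length + b.length + 2) [(0, a.length, 0, b.length)] []).Perm
      (collectW a b 0 a.length 0 b.length) := by
    have hg := gmb_perm a b (a.length + b.length + 2) [(0, a.length, 0, b.length)] []
      (by simp [wmeas])
      (by intro w hw
          simp only [List.mem_singleton] at hw
          subst hw
          exact le_rfl)
    simpa using hg
  have hsort : sortBlocks (gmbQueue a b (a.length + b.length + 2) [(0, a.length, 0, b.length)] [])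
      = collectW a b 0 a.length 0 b.length :=
    sortBlocks_eq _ _ hperm (collectW_pairwise a b (a.length + b.length) _ _ _ _ (by omega))
  rw [hsort]
  rw [mergeAdj_walk_init a b _ _
      (fun x hx => (collectW_bounds a b (a.length + b.length) _ _ _ _ (by omega) x hx).1)]
  rw [altWalk_collect a b (a.length + b.length) 0 a.length 0 b.length 0 [] (by omega)]
  have htail : altWalk a b [(a.length, b.length, 0)] a.length b.length = [] := by
    simp only [altWalk]
    rw [sliceN_empty a le_rfl, sliceN_empty b le_rfl, sliceN_empty a (by omega)]
    rfl
  rw [htail, List.append_nil]
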